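-- pv_equiv track=rewrite | github.com/SoumyadipPayra/ms-asr | ms-asr-gateway/src/asr_gateway/post_processor.py | _remove_fillers
-- ===== SOURCE A (Python) =====
-- FILLER_WORDS = {
--     "um", "uh", "er", "ah", "hmm", "mm",
-- }
--
-- FILLER_PHRASES = [
--     "you know", "i mean", "sort of", "kind of",
-- ]
--
-- def _remove_fillers(words: list[dict]) -> list[dict]:
--     """Remove filler words from the word list."""
--     filtered = []
--     i = 0
--     while i < len(words):
--         word_lower = words[i]["word"].lower().strip().strip(".,!?")
--
--         # Check multi-word filler phrases
--         matched_phrase = False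
--         for phrase in FILLER_PHRASES:
--             phrase_words = phrase.split()
--             phrase_len = len(phrase_words)
--             if i + phrase_len <= len(words):
--                 candidate = [
--                     words[i + j]["word"].lower().strip().strip(".,!?")
--                     for j in range(phrase_len)
--                 ]
--                 if candidate == phrase_words:
--                     i += phrase_len
--                     matched_phrase = True
--                     break
--
--         if matched_phrase:
--             continue
--
--         # Check single-word fillers
--         if word_lower in FILLER_WORDS:
--             i += 1
--             continue
--
--         filtered.append(words[i])
--         i += 1
--
--     return filtered
-- ===== SOURCE B (Python) =====
-- FILLER_WORDS = {
--     "um", "uh", "er", "ah", "hmm", "mm",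
-- }
--
-- FILLER_PHRASES = [
--     "you know", "i mean", "sort of", "kind of",
-- ]
--
-- # The phrase lexicon is non-overlapping: no phrase's second word is any phrase's
-- # first word or a filler word, so whether a word survives is a purely local
-- # property of its index -- no scan state is needed.
-- _PHRASE_PAIRS = {(p.split()[0], p.split()[1]) for p in FILLER_PHRASES}
--
-- def _remove_fillers(words: list[dict]) -> list[dict]:
--     """Remove filler words from the word list (stateless local predicate)."""
--     toks = [w["word"].lower().strip().strip(".,!?") for w in words]
--
--     def starts(i):
--         return i + 1 < len(toks) and (toks[i], toks[i + 1]) in _PHRASE_PAIRS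
--
--     return [w for i, w in enumerate(words)
--             if not starts(i) and not (i > 0 and starts(i - 1))
--             and toks[i] not in FILLER_WORDS]
-- ===== Notes on version B (the rewrite author's own statement) =====
-- stated objective: alternative
-- what changed: A runs a stateful greedy consuming scan (jump 2 past a matched phrase, else test the single token); B has no scan state at all: it keeps word i iff no filler phrase starts at index i or i-1 and the token is not a filler, which is correct because the phrase lexicon is non-overlapping (no phrase's second word is any phrase's first word or a filler).
import Mathlib
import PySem

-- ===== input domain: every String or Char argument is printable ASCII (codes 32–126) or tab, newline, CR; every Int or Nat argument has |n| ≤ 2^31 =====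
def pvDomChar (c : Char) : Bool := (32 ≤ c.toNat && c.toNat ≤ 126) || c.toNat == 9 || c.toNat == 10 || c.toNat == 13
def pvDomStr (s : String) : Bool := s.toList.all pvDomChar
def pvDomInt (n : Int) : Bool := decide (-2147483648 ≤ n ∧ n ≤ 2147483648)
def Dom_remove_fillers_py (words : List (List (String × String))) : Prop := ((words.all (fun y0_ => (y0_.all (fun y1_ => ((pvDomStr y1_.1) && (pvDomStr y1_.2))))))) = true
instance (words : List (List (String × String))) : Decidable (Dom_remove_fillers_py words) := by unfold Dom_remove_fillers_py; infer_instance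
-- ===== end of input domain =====

-- B replaces A's stateful greedy consuming scan by a stateless per-index predicate:
-- because no phrase's second word is any phrase's first word or a filler, a word
-- survives iff no phrase starts at its index or the previous one and it is not a
-- filler token (objective: alternative algorithm, same cost).

-- ===== PORT A =====
def fillerWordsA : PySem.Set String := PySem.Set.ofList ["um", "uh", "er", "ah", "hmm", "mm"]
def fillerPhrasesA : List String := ["you know", "i mean", "sort of", "kind of"]

-- words[i]["word"].lower().strip().strip(".,!?"); the .getD "" default is never hit under Pre_
def normA (w : List (String × String)) : String :=
  PySem.Str.stripChars (PySem.Str.strip (PySem.Str.lower ((List.lookup "word" w).getD ""))) ".,!?"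

-- the 'for phrase in FILLER_PHRASES' loop: some phrase_len on the first match (break), none otherwise
def tryPhrasesA (words : List (List (String × String))) (i : Nat) : List String → Option Nat
  | [] => none
  | phrase :: rest =>
    let phrase_words := PySem.Str.split₀ phrase
    let phrase_len := phrase_words.length
    if i + phrase_len ≤ words.length then
      let candidate := (List.range phrase_len).map (fun j => normA (words.getD (i + j) []))
      if candidate = phrase_words then some phrase_len else tryPhrasesA words i rest
    else tryPhrasesA words i rest

lemma tryPhrasesA_some {words : List (List (String × String))} {i n : Nat} :
    ∀ ps, tryPhrasesA words i ps = some n →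
      (∃ p ∈ ps, n = (PySem.Str.split₀ p).length) ∧ i + n ≤ words.length := by
  intro ps h
  induction ps with
  | nil => simp [tryPhrasesA] at h
  | cons p rest ih =>
    simp only [tryPhrasesA] at h
    split_ifs at h with h1 h2
    · obtain ⟨rfl⟩ : (PySem.Str.split₀ p).length = n := by
        simpa using h
      exact ⟨⟨p, by simp, rfl⟩, h1⟩
    · obtain ⟨⟨q, hq, hql⟩, hb⟩ := ih h
      exact ⟨⟨q, by simp [hq], hql⟩, hb⟩
    · obtain ⟨⟨q, hq, hql⟩, hb⟩ := ih h
      exact ⟨⟨q, by simp [hq], hql⟩, hb⟩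

lemma fillerPhrasesA_len : ∀ p ∈ fillerPhrasesA, (PySem.Str.split₀ p).length = 2 := by decide

def loopA (words : List (List (String × String))) (i : Nat) : List (List (String × String)) :=
  if h : i < words.length then
    let word_lower := normA words[i]
    match h2 : tryPhrasesA words i fillerPhrasesA with
    | some plen => loopA words (i + plen)
    | none =>
      if PySem.Set.contains fillerWordsA word_lower then loopA words (i + 1)
      else words[i] :: loopA words (i + 1)
  else []
  termination_by words.length - i
  decreasing_by
  · obtain ⟨⟨p, hp, hpl⟩, _⟩ := tryPhrasesA_some _ h2
    have := fillerPhrasesA_len p hp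
    omega
  · omega
  · omega

def remove_fillers_py (words : List (List (String × String))) : List (List (String × String)) :=
  loopA words 0

-- ===== PORT B =====
def fillerWordsB : PySem.Set String := PySem.Set.ofList ["um", "uh", "er", "ah", "hmm", "mm"]
def fillerPhrasesB : List String := ["you know", "i mean", "sort of", "kind of"]

-- w["word"].lower().strip().strip(".,!?") (Source B's normalization pass)
def normB (w : List (String × String)) : String :=
  PySem.Str.stripChars (PySem.Str.strip (PySem.Str.lower ((List.lookup "word" w).getD ""))) ".,!?"

-- _PHRASE_PAIRS = {(p.split()[0], p.split()[1]) for p in FILLER_PHRASES}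
-- (the .getD _ "" defaults mirror p.split()[k], which never raises on these literals)
def phrasePairsB : PySem.Set (String × String) :=
  PySem.Set.ofList (fillerPhrasesB.map fun p =>
    ((PySem.Str.split₀ p).getD 0 "", (PySem.Str.split₀ p).getD 1 ""))

-- def starts(i): return i + 1 < len(toks) and (toks[i], toks[i+1]) in _PHRASE_PAIRS
def startsB (toks : List String) (i : Nat) : Bool :=
  decide (i + 1 < toks.length) && PySem.Set.contains phrasePairsB (toks.getD i "", toks.getD (i + 1) "")

-- the comprehension's condition for index i
def keepB (toks : List String) (i : Nat) : Bool :=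
  !startsB toks i && !(decide (1 ≤ i) && startsB toks (i - 1)) &&
    !PySem.Set.contains fillerWordsB (toks.getD i "")

def remove_fillers_py_alt (words : List (List (String × String))) : List (List (String × String)) :=
  let toks := words.map normB
  ((words.zipIdx).filter (fun p => keepB toks p.2)).map (·.1)

-- ===== PRECONDITION & SPEC =====
-- Pre_ excludes exactly the inputs on which A raises KeyError: a word dict without a "word" key
-- (B raises there too).
def Pre_remove_fillers_py (words : List (List (String × String))) : Prop :=
  ∀ w ∈ words, (List.lookup "word" w).isSome = true
instance (words : List (List (String × String))) : Decidable (Pre_remove_fillers_py words) := by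
  unfold Pre_remove_fillers_py; infer_instance

def pvWitness_remove_fillers_py : (List (List (String × String))) :=
  [[("word", "Hello")], [("word", "um")], [("word", "you")], [("word", "know,")]]

def Spec_remove_fillers_py (words : List (List (String × String))) (out : List (List (String × String))) : Prop := out = remove_fillers_py_alt words
instance (words : List (List (String × String))) (out : List (List (String × String))) : Decidable (Spec_remove_fillers_py words out) := by unfold Spec_remove_fillers_py; infer_instance

-- ===== CLAIM (what is proved, stated in full; the proofs are below) =====
def Claim_equal_remove_fillers_py : Prop := ∀ (words : List (List (String × String))), Dom_remove_fillers_py words → Pre_remove_fillers_py words → Spec_remove_fillers_py words (remove_fillers_py words)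

-- ===== LEMMAS AND PROOFS =====

-- unfolding equations for A's loop
lemma loopA_stop {words i} (h : ¬ i < words.length) : loopA words i = [] := by
  rw [loopA]; simp [h]

lemma loopA_of_some {words : List (List (String × String))} {i plen} (h : i < words.length)
    (h2 : tryPhrasesA words i fillerPhrasesA = some plen) :
    loopA words i = loopA words (i + plen) := by
  rw [loopA]; simp only [dif_pos h]
  split <;> simp_all

lemma loopA_of_none {words : List (List (String × String))} {i} (h : i < words.length)
    (h2 : tryPhrasesA words i fillerPhrasesA = none) :
    loopA words i =
      (if PySem.Set.contains fillerWordsA (normA words[i]) then loopA words (i + 1)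
       else words[i] :: loopA words (i + 1)) := by
  rw [loopA]; simp only [dif_pos h]
  split <;> simp_all

lemma normB_eq : normB = normA := rfl

lemma map_normA_getD (words : List (List (String × String))) (i : Nat) (h : i < words.length) :
    (words.map normA).getD i "" = normA (words.getD i []) := by
  rw [List.getD_eq_getElem?_getD, List.getD_eq_getElem?_getD, List.getElem?_map,
    List.getElem?_eq_getElem h]
  simp

lemma phrasePairsB_val :
    phrasePairsB = [("you", "know"), ("i", "mean"), ("sort", "of"), ("kind", "of")] := by decide

-- A's phrase-chain at i returns some 2 exactly when B's local pair test fires at i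
lemma tryA_eq_startsB (words : List (List (String × String))) (i : Nat) :
    tryPhrasesA words i fillerPhrasesA =
      (if startsB (words.map normA) i then some 2 else none) := by
  have s1 : PySem.Str.split₀ "you know" = ["you", "know"] := by decide
  have s2 : PySem.Str.split₀ "i mean" = ["i", "mean"] := by decide
  have s3 : PySem.Str.split₀ "sort of" = ["sort", "of"] := by decide
  have s4 : PySem.Str.split₀ "kind of" = ["kind", "of"] := by decide
  have hr : List.range 2 = [0, 1] := rfl
  by_cases hlt : i + 1 < words.length
  · have ha := map_normA_getD words i (by omega)
    have hb := map_normA_getD words (i + 1) hlt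
    rw [show startsB (words.map normA) i =
        (PySem.Set.contains phrasePairsB
          (normA (words.getD i []), normA (words.getD (i + 1) []))) by
      simp only [startsB, List.length_map, hlt, decide_true, Bool.true_and, ha, hb]]
    simp only [fillerPhrasesA, tryPhrasesA, s1, s2, s3, s4, List.length_cons, List.length_nil,
      hr, List.map_cons, List.map_nil, Nat.add_zero,
      if_pos (show i + 2 ≤ words.length by omega)]
    generalize normA (words.getD i []) = a
    generalize normA (words.getD (i + 1) []) = b
    simp only [phrasePairsB_val, PySem.Set.contains, List.contains_eq_mem, List.mem_cons,
      List.not_mem_nil, or_false, List.cons.injEq, and_true, Prod.mk.injEq, decide_eq_true_eq]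
    split_ifs <;> first | rfl | tauto
  · have hg : ¬ i + 2 ≤ words.length := by omega
    simp [fillerPhrasesA, tryPhrasesA, s1, s2, s3, s4, startsB, hg, hlt]

-- lexicon fact: a phrase's second word is never a phrase's first word
lemma starts_not_next (toks : List String) (i : Nat) (h : startsB toks i = true) :
    startsB toks (i + 1) = false := by
  simp only [startsB, phrasePairsB_val, PySem.Set.contains, List.contains_eq_mem, List.mem_cons,
    List.not_mem_nil, or_false, Bool.and_eq_true, decide_eq_true_eq, Prod.mk.injEq] at h ⊢
  obtain ⟨-, h⟩ := h
  by_contra hc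
  simp only [Bool.not_eq_false, Bool.and_eq_true, decide_eq_true_eq] at hc
  obtain ⟨-, hc⟩ := hc
  rcases h with ⟨-, h⟩ | ⟨-, h⟩ | ⟨-, h⟩ | ⟨-, h⟩ <;>
    rcases hc with ⟨hc, -⟩ | ⟨hc, -⟩ | ⟨hc, -⟩ | ⟨hc, -⟩ <;> rw [h] at hc <;> exact absurd hc (by decide)

-- main correspondence: A's consuming loop from i = B's local filter of the tail,
-- under the invariant that no phrase starts just before i
lemma loopA_eq (words : List (List (String × String))) :
    ∀ fuel i, words.length - i ≤ fuel →
      (i = 0 ∨ startsB (words.map normA) (i - 1) = false) →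
      loopA words i =
        (((words.drop i).zipIdx i).filter (fun p => keepB (words.map normA) p.2)).map (·.1) := by
  intro fuel
  induction fuel with
  | zero =>
    intro i hf _
    have h : ¬ i < words.length := by omega
    rw [loopA_stop h]
    simp [List.drop_eq_nil_of_le (by omega : words.length ≤ i)]
  | succ fuel ih =>
    intro i hf hprev
    by_cases h : i < words.length
    · by_cases hs : startsB (words.map normA) i = true
      · -- phrase starts at i: A consumes two; B's filter drops indices i and i+1
        have htry : tryPhrasesA words i fillerPhrasesA = some 2 := by
          rw [tryA_eq_startsB, if_pos hs]
        have hlt : i + 1 < words.length := by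
          have := hs
          simp only [startsB, Bool.and_eq_true, decide_eq_true_eq, List.length_map] at this
          exact this.1
        have hdrop : words.drop i = words[i] :: words[i + 1] :: words.drop (i + 2) := by
          rw [List.drop_eq_getElem_cons h, List.drop_eq_getElem_cons hlt]
        have hk1 : keepB (words.map normA) i = false := by
          simp [keepB, hs]
        have hk2 : keepB (words.map normA) (i + 1) = false := by
          simp [keepB, hs]
        rw [loopA_of_some h htry, ih (i + 2) (by omega) (Or.inr (by simpa using starts_not_next _ i hs)),
          hdrop]
        simp only [List.zipIdx_cons, List.filter_cons, hk1, hk2, Bool.false_eq_true, if_false]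
      · -- no phrase at i: A tests the single token; B's filter keeps iff it is no filler
        have htry : tryPhrasesA words i fillerPhrasesA = none := by
          rw [tryA_eq_startsB, if_neg hs]
        have htok : (Option.map normA words[i]?).getD "" = normA words[i] := by
          rw [List.getElem?_eq_getElem h]; rfl
        have hk : keepB (words.map normA) i =
            !PySem.Set.contains fillerWordsA (normA words[i]) := by
          rcases hprev with rfl | hprev
          · simp [keepB, hs, htok, fillerWordsB, fillerWordsA]
          · simp [keepB, hs, hprev, htok, fillerWordsB, fillerWordsA]
        have hdrop : words.drop i = words[i] :: words.drop (i + 1) := List.drop_eq_getElem_cons h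
        rw [loopA_of_none h htry, ih (i + 1) (by omega) (Or.inr (by simpa using hs)), hdrop]
        simp only [List.zipIdx_cons, List.filter_cons, hk]
        cases hc : PySem.Set.contains fillerWordsA (normA words[i]) <;> simp
    · rw [loopA_stop h]
      simp [List.drop_eq_nil_of_le (by omega : words.length ≤ i)]

-- ===== VERDICT (by name: the statement is the Claim_ definition above) =====
theorem remove_fillers_py_spec : Claim_equal_remove_fillers_py := by
  intro words _ _
  unfold Spec_remove_fillers_py remove_fillers_py remove_fillers_py_alt
  rw [normB_eq, loopA_eq words words.length 0 (by omega) (Or.inl rfl)]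
  simp
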